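-- pv_equiv track=rewrite | github.com/fabiogallotti/adventofcode | src/year2024/day25/functions.py | preprocessing
-- ===== SOURCE A (Python) =====
-- def preprocessing(data):
--     locks = []
--     keys = []
--
--     current = []
--     for row in data:
--         if row == "" and current:
--             (locks if current[0].startswith("#") else keys).append(current)
--             current = []
--         elif row != "":
--             current.append(row)
--
--     if current:
--         (locks if current[0].startswith("#") else keys).append(current)
--
--     return locks, keys
-- ===== SOURCE B (Python) =====
-- def preprocessing(data):
--     # Phase 1: split into maximal blocks of non-empty lines by index scanning; phase 2: classify.
--     n = len(data)
--     blocks = []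
--     i = 0
--     while i < n:
--         if data[i] == "":
--             i += 1
--         else:
--             j = i + 1
--             while j < n and data[j] != "":
--                 j += 1
--             blocks.append(data[i:j])
--             i = j
--     locks = [b for b in blocks if b[0].startswith("#")]
--     keys = [b for b in blocks if not b[0].startswith("#")]
--     return locks, keys
-- ===== Notes on version B (the rewrite author's own statement) =====
-- stated objective: alternative
-- what changed: B first splits the lines into maximal non-empty blocks and then classifies the list of blocks with two comprehensions, instead of A's single pass that maintains and flushes a 'current' accumulator into locks/keys as it goes.
import Mathlib
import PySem

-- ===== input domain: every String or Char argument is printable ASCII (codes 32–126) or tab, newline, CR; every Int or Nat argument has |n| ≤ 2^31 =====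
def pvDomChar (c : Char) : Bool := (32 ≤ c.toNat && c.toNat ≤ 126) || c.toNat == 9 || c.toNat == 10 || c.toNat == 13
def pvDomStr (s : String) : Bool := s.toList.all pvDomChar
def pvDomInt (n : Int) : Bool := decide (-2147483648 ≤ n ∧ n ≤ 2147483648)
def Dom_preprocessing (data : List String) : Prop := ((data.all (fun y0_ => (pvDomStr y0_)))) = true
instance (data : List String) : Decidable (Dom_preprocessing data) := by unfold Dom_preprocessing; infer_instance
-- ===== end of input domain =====

-- B splits the input into maximal non-empty blocks first (index scanning, one pass) and then
-- classifies the list of blocks with two filters, instead of A's single pass flushing a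
-- 'current' accumulator into locks/keys as it goes (alternative decomposition).

-- b[0].startswith("#") / current[0].startswith("#"), used by both sources
def pvIsLock (b : List String) : Bool := PySem.Str.startswith (b.headD "") "#"

-- ===== PORT A =====
-- one loop step of A: (locks, keys, current) updated by one row
def pvStepA (st : List (List String) × List (List String) × List String) (row : String) :
    List (List String) × List (List String) × List String :=
  let (locks, keys, current) := st
  if row = "" ∧ current ≠ [] then
    if pvIsLock current then (locks ++ [current], keys, [])
    else (locks, keys ++ [current], [])
  else if row ≠ "" then (locks, keys, current ++ [row])
  else (locks, keys, current)

def preprocessing (data : List String) : List (List String) × List (List String) :=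
  let st := data.foldl pvStepA ([], [], [])
  let locks := st.1
  let keys := st.2.1
  let current := st.2.2
  if current ≠ [] then
    if pvIsLock current then (locks ++ [current], keys)
    else (locks, keys ++ [current])
  else (locks, keys)

-- ===== PORT B =====
-- B's inner while loop: advance j while j < n and data[j] != ""
def pvScan (data : List String) (j : Nat) : Nat :=
  if h : j < data.length then
    if data[j] != "" then pvScan data (j + 1) else j
  else j
termination_by data.length - j

-- cited by pvBlocksLoop's decreasing_by
theorem pvScan_ge (data : List String) (j : Nat) : j ≤ pvScan data j := by
  induction j using pvScan.induct data with
  | case1 j h hne ih => unfold pvScan; simp only [h, dif_pos, hne, if_pos]; omega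
  | case2 j h hne => unfold pvScan; simp [h, hne]
  | case3 j h => unfold pvScan; simp [h]

-- B's outer while loop: skip a blank line, or cut the block data[i:j] and jump to j
def pvBlocksLoop (data : List String) (i : Nat) : List (List String) :=
  if h : i < data.length then
    if data[i] = "" then pvBlocksLoop data (i + 1)
    else
      PySem.List.slice data (some (i : Int)) (some ((pvScan data (i + 1) : Nat) : Int)) ::
        pvBlocksLoop data (pvScan data (i + 1))
  else []
termination_by data.length - i
decreasing_by
  · omega
  · have := pvScan_ge data (i + 1); omega

def preprocessing_alt (data : List String) : List (List String) × List (List String) :=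
  let bs := pvBlocksLoop data 0
  (bs.filter (fun b => pvIsLock b), bs.filter (fun b => !pvIsLock b))

-- ===== PRECONDITION & SPEC =====
def Spec_preprocessing (data : List String) (out : List (List String) × List (List String)) : Prop := out = preprocessing_alt data
instance (data : List String) (out : List (List String) × List (List String)) : Decidable (Spec_preprocessing data out) := by unfold Spec_preprocessing; infer_instance

-- ===== CLAIM (what is proved, stated in full; the proofs are below) =====
def Claim_equal_preprocessing : Prop := ∀ (data : List String), Dom_preprocessing data → Spec_preprocessing data (preprocessing data)

-- ===== LEMMAS AND PROOFS =====

-- structural version of B's block splitter, the bridge between the two ports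
def pvBlocksRec : List String → List (List String)
  | [] => []
  | r :: rest =>
    if r = "" then pvBlocksRec rest
    else (r :: rest.takeWhile (· != "")) :: pvBlocksRec (rest.dropWhile (· != ""))
termination_by l => l.length
decreasing_by
  · simp
  · exact Nat.lt_succ_of_le (List.length_dropWhile_le _ _)

-- the blocks still to be produced by A's loop, given the pending accumulator `cur`
def pvG (cur : List String) : List String → List (List String)
  | [] => if cur = [] then [] else [cur]
  | r :: rest =>
    if r = "" then (if cur = [] then pvG [] rest else cur :: pvG [] rest)
    else pvG (cur ++ [r]) rest

def pvFinish (st : List (List String) × List (List String) × List String) :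
    List (List String) × List (List String) :=
  if st.2.2 ≠ [] then
    if pvIsLock st.2.2 then (st.1 ++ [st.2.2], st.2.1) else (st.1, st.2.1 ++ [st.2.2])
  else (st.1, st.2.1)

theorem pvFoldA (data : List String) : ∀ (locks keys : List (List String)) (cur : List String),
    pvFinish (data.foldl pvStepA (locks, keys, cur)) =
      (locks ++ (pvG cur data).filter (fun b => pvIsLock b),
       keys ++ (pvG cur data).filter (fun b => !pvIsLock b)) := by
  induction data with
  | nil =>
    intro locks keys cur
    by_cases h : cur = [] <;>
      simp only [List.foldl_nil, pvG, pvFinish, h] <;>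
      cases hl : pvIsLock cur <;> simp [h, hl, List.filter]
  | cons r rest ih =>
    intro locks keys cur
    by_cases hr : r = ""
    · by_cases hc : cur = []
      · simp [List.foldl_cons, pvStepA, pvG, hr, hc, ih]
      · simp only [List.foldl_cons, pvStepA, pvG, hr, hc]
        cases hl : pvIsLock cur <;>
          simp [hl, hc, ih]
    · simp [List.foldl_cons, pvStepA, pvG, hr, ih]

theorem pvG_blocks (data : List String) :
    pvG [] data = pvBlocksRec data ∧
    ∀ cur : List String, cur ≠ [] →
      pvG cur data = (cur ++ data.takeWhile (· != "")) :: pvBlocksRec (data.dropWhile (· != "")) := by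
  induction data with
  | nil =>
    refine ⟨by simp [pvG, pvBlocksRec], ?_⟩
    intro cur hc
    simp [pvG, pvBlocksRec, hc]
  | cons r rest ih =>
    constructor
    · by_cases hr : r = ""
      · simp [pvG, pvBlocksRec, hr, ih.1]
      · have := ih.2 [r] (by simp)
        simp [pvG, pvBlocksRec, hr, this]
    · intro cur hc
      by_cases hr : r = ""
      · simp [pvG, pvBlocksRec, hr, hc, ih.1]
      · have := ih.2 (cur ++ [r]) (by simp)
        simp [pvG, hr, this]

theorem pvDropWhile_eq_drop {α : Type} (p : α → Bool) (l : List α) :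
    l.dropWhile p = l.drop (l.takeWhile p).length := by
  induction l with
  | nil => rfl
  | cons a t ih =>
    by_cases h : p a <;> simp [h, ih]

theorem pvScan_eq (data : List String) (j : Nat) :
    pvScan data j = j + ((data.drop j).takeWhile (· != "")).length := by
  induction j using pvScan.induct data with
  | case1 j h hne ih =>
    have hd : data.drop j = data[j] :: data.drop (j + 1) := List.drop_eq_getElem_cons h
    unfold pvScan
    rw [hd]
    simp only [List.takeWhile_cons, hne, if_pos, h, dif_pos, ih, List.length_cons]
    omega
  | case2 j h hne =>
    have hd : data.drop j = data[j] :: data.drop (j + 1) := List.drop_eq_getElem_cons h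
    unfold pvScan
    rw [hd]
    simp only [List.takeWhile_cons, h, dif_pos]
    rw [if_neg hne, if_neg hne]
    simp
  | case3 j h =>
    unfold pvScan
    have : data.drop j = [] := List.drop_eq_nil_of_le (by omega)
    simp [h, this]

theorem pvLoop_eq (data : List String) (i : Nat) :
    pvBlocksLoop data i = pvBlocksRec (data.drop i) := by
  induction i using pvBlocksLoop.induct data with
  | case1 i h he ih =>
    unfold pvBlocksLoop
    rw [List.drop_eq_getElem_cons h]
    simp [h, he, pvBlocksRec, ih]
  | case2 i h he ih =>
    unfold pvBlocksLoop
    have hscan := pvScan_eq data (i + 1)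
    set L := ((data.drop (i + 1)).takeWhile (· != "")).length with hL
    have hdropi : data.drop i = data[i] :: data.drop (i + 1) := List.drop_eq_getElem_cons h
    have hslice : PySem.List.slice data (some (i : Int)) (some ((pvScan data (i + 1) : Nat) : Int)) =
        data[i] :: (data.drop (i + 1)).takeWhile (· != "") := by
      rw [PySem.List.slice_natCast, hscan, hdropi]
      have : i + 1 + L - i = L + 1 := by omega
      rw [this, List.take_succ_cons]
      congr 1
      exact (List.prefix_iff_eq_take.mp (List.takeWhile_prefix _)).symm
    have hdropj : data.drop (pvScan data (i + 1)) = (data.drop (i + 1)).dropWhile (· != "") := by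
      rw [hscan, pvDropWhile_eq_drop, ← hL, List.drop_drop]
    rw [hdropi]
    simp only [pvBlocksRec, he]
    simp [h, hslice, ih, hdropj]
  | case3 i h =>
    unfold pvBlocksLoop
    have : data.drop i = [] := List.drop_eq_nil_of_le (by omega)
    simp [h, this, pvBlocksRec]

-- ===== VERDICT (by name: the statement is the Claim_ definition above) =====
theorem preprocessing_spec : Claim_equal_preprocessing := by
  intro data _
  unfold Spec_preprocessing preprocessing preprocessing_alt
  have h := pvFoldA data [] [] []
  rw [(pvG_blocks data).1] at h
  rw [show pvBlocksLoop data 0 = pvBlocksRec data from by simpa using pvLoop_eq data 0]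
  simpa [pvFinish] using h
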